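-- pv_equiv track=rewrite | github.com/diegoami/split-videos-to-frames | find_contour.py | found_extremes_map
-- ===== SOURCE A (Python) =====
-- def found_extremes_map(dmap):
--     fmap, lmap = {}, {}
--     last_seen_value, running_keys = -1, []
--     for key, value in dmap.items():
--         if value != -1:
--             last_seen_value = value
--             for run_key in running_keys:
--                 lmap[run_key] = value
--             running_keys = []
--         else:
--             if last_seen_value != -1:
--                 running_keys.append(key)
--                 for run_key in running_keys:
--                     fmap[run_key] = last_seen_value
--     return fmap, lmap
-- ===== SOURCE B (Python) =====
-- def found_extremes_map(dmap):
--     # Forward fill + precomputed next-value map instead of a running-keys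
--     # buffer with repeated inner rewrite loops.
--     nxt = {}
--     n = -1
--     for key, value in reversed(list(dmap.items())):
--         if value != -1:
--             n = value
--         else:
--             nxt[key] = n
--     fmap, lmap = {}, {}
--     last = -1
--     for key, value in dmap.items():
--         if value != -1:
--             last = value
--         elif last != -1:
--             fmap[key] = last
--             nv = nxt[key]
--             if nv != -1:
--                 lmap[key] = nv
--     return fmap, lmap
-- ===== Notes on version B (the rewrite author's own statement) =====
-- stated objective: alternative
-- what changed: Replaces A's running_keys buffer with its redundant inner rewrite loops by a backward pass that precomputes each -1 key's next value, followed by a single forward fill pass; Pre_ only rules out association lists with duplicate keys, which do not represent any dict argument.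
import Mathlib
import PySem

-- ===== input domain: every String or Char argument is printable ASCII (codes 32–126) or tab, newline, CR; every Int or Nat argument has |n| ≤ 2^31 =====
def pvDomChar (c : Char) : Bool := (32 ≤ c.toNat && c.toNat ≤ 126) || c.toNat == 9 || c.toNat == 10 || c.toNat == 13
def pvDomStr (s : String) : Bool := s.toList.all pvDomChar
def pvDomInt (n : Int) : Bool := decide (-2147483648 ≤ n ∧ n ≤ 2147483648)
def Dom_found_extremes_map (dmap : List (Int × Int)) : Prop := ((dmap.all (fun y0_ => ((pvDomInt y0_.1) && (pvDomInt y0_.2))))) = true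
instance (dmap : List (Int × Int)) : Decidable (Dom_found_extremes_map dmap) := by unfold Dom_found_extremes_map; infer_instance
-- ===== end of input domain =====

-- B replaces A's running-keys buffer and its redundant inner rewrite loops by a
-- backward pass precomputing each -1 key's next value, then one forward fill pass.

-- ===== PORT A =====
-- the for-loop over dmap.items() with state (fmap, lmap, last_seen_value, running_keys)
def fexA_loop : List (Int × Int) → PySem.Dict Int Int → PySem.Dict Int Int → Int → List Int →
    PySem.Dict Int Int × PySem.Dict Int Int
  | [], fmap, lmap, _, _ => (fmap, lmap)
  | (key, value) :: rest, fmap, lmap, last, run =>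
    if value ≠ -1 then
      fexA_loop rest fmap (run.foldl (fun d rk => d.insert rk value) lmap) value []
    else if last ≠ -1 then
      fexA_loop rest ((run ++ [key]).foldl (fun d rk => d.insert rk last) fmap) lmap last (run ++ [key])
    else
      fexA_loop rest fmap lmap last run

def found_extremes_map (dmap : List (Int × Int)) : (List (Int × Int)) × (List (Int × Int)) :=
  let r := fexA_loop dmap PySem.Dict.empty PySem.Dict.empty (-1) []
  (r.1.items, r.2.items)

-- ===== PORT B =====
-- backward pass: for key, value in reversed(list(dmap.items())): …  building nxt
def fexB_nxt (dmap : List (Int × Int)) : PySem.Dict Int Int :=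
  (dmap.reverse.foldl
    (fun (st : PySem.Dict Int Int × Int) kv =>
      if kv.2 ≠ -1 then (st.1, kv.2) else (st.1.insert kv.1 st.2, st.2))
    (PySem.Dict.empty, -1)).1

-- forward fill pass; nxt[key] always exists when value = -1 (the backward pass wrote
-- it), so getD is exact here (Python's nxt[key] never raises)
def fexB_loop (nxt : PySem.Dict Int Int) : List (Int × Int) → PySem.Dict Int Int →
    PySem.Dict Int Int → Int → PySem.Dict Int Int × PySem.Dict Int Int
  | [], fmap, lmap, _ => (fmap, lmap)
  | (key, value) :: rest, fmap, lmap, last =>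
    if value ≠ -1 then
      fexB_loop nxt rest fmap lmap value
    else if last ≠ -1 then
      let fmap' := fmap.insert key last
      let nv := nxt.getD key (-1)
      if nv ≠ -1 then
        fexB_loop nxt rest fmap' (lmap.insert key nv) last
      else
        fexB_loop nxt rest fmap' lmap last
    else
      fexB_loop nxt rest fmap lmap last

def found_extremes_map_alt (dmap : List (Int × Int)) : (List (Int × Int)) × (List (Int × Int)) :=
  let nxt := fexB_nxt dmap
  let r := fexB_loop nxt dmap PySem.Dict.empty PySem.Dict.empty (-1)
  (r.1.items, r.2.items)

-- ===== PRECONDITION & SPEC =====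
-- A's argument is a Python dict, whose keys are necessarily distinct; an association
-- list with duplicate keys does not represent any dict input, so Pre_ excludes it.
def Pre_found_extremes_map (dmap : List (Int × Int)) : Prop := (dmap.map Prod.fst).dedup = dmap.map Prod.fst
instance (dmap : List (Int × Int)) : Decidable (Pre_found_extremes_map dmap) := by
  unfold Pre_found_extremes_map; infer_instance

def pvWitness_found_extremes_map : (List (Int × Int)) := [(0, 5), (1, -1), (2, 7), (3, -1)]

def Spec_found_extremes_map (dmap : List (Int × Int)) (out : (List (Int × Int)) × (List (Int × Int))) : Prop := out = found_extremes_map_alt dmap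
instance (dmap : List (Int × Int)) (out : (List (Int × Int)) × (List (Int × Int))) : Decidable (Spec_found_extremes_map dmap out) := by unfold Spec_found_extremes_map; infer_instance

-- ===== CLAIM (what is proved, stated in full; the proofs are below) =====
def Claim_equal_found_extremes_map : Prop := ∀ (dmap : List (Int × Int)), Dom_found_extremes_map dmap → Pre_found_extremes_map dmap → Spec_found_extremes_map dmap (found_extremes_map dmap)

-- ===== LEMMAS AND PROOFS =====

-- the first value ≠ -1 in a suffix, or -1
def nextVal : List (Int × Int) → Int
  | [] => -1
  | (_, v) :: rest => if v ≠ -1 then v else nextVal rest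

-- foldr form of the backward pass
def bnx : List (Int × Int) → PySem.Dict Int Int × Int
  | [] => (PySem.Dict.empty, -1)
  | (k, v) :: rest =>
    let p := bnx rest
    if v ≠ -1 then (p.1, v) else (p.1.insert k p.2, p.2)

theorem bnx_eq (dmap : List (Int × Int)) : fexB_nxt dmap = (bnx dmap).1 := by
  unfold fexB_nxt
  rw [List.foldl_reverse]
  congr 1
  induction dmap with
  | nil => rfl
  | cons kv rest ih =>
    obtain ⟨k, v⟩ := kv
    simp only [List.foldr_cons, ih, bnx]

theorem bnx_snd (l : List (Int × Int)) : (bnx l).2 = nextVal l := by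
  induction l with
  | nil => rfl
  | cons kv rest ih =>
    obtain ⟨k, v⟩ := kv
    simp only [bnx, nextVal]
    by_cases h : v = -1 <;> simp [h, ih]

theorem bnx_lookup (pre : List (Int × Int)) (k : Int) (post : List (Int × Int))
    (hnd : ((pre ++ (k, -1) :: post).map Prod.fst).Nodup) :
    (bnx (pre ++ (k, -1) :: post)).1.getD k (-1) = nextVal post := by
  induction pre with
  | nil =>
    simp only [List.nil_append, bnx]
    simp [PySem.Dict.getD_insert_self, bnx_snd]
  | cons kv pre' ih =>
    obtain ⟨k0, v0⟩ := kv
    simp only [List.cons_append, List.map_cons, List.nodup_cons] at hnd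
    have hk0 : k ≠ k0 := by
      intro h; subst h
      exact hnd.1 (by simp)
    show ((if v0 ≠ -1 then _ else _ : PySem.Dict Int Int × Int)).1.getD k (-1) = nextVal post
    by_cases h : v0 = -1
    · rw [if_neg (by simp [h])]
      rw [PySem.Dict.getD_insert_of_ne _ _ _ hk0]
      exact ih hnd.2
    · rw [if_pos h]
      exact ih hnd.2

theorem insert_same {d : PySem.Dict Int Int} {k v : Int}
    (hnd : d.keys.Nodup) (h : d.get? k = some v) : d.insert k v = d := by
  apply PySem.Dict.ext
  have hc : d.contains k = true := by
    rw [PySem.Dict.contains_eq_isSome_get?, h]; rfl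
  rw [PySem.Dict.items_insert_of_contains _ _ hc]
  conv_rhs => rw [← List.map_id d.items]
  apply List.map_congr_left
  intro p hp
  obtain ⟨p1, p2⟩ := p
  by_cases hpk : p1 = k
  · subst hpk
    have h2 : d.get? p1 = some p2 := PySem.Dict.get?_of_mem_items _ hp hnd
    rw [h] at h2
    simp only [Option.some.injEq] at h2
    simp [h2]
  · simp [hpk]

theorem foldl_insert_id (run : List Int) (d : PySem.Dict Int Int) (last : Int)
    (hnd : d.keys.Nodup) (h : ∀ rk ∈ run, d.get? rk = some last) :
    run.foldl (fun d rk => d.insert rk last) d = d := by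
  induction run with
  | nil => rfl
  | cons r rs ih =>
    simp only [List.foldl_cons]
    rw [insert_same hnd (h r (by simp))]
    exact ih (fun rk hrk => h rk (by simp [hrk]))

theorem main_loop (nxt : PySem.Dict Int Int) :
    ∀ (rest : List (Int × Int)) (f lA lB : PySem.Dict Int Int) (last : Int) (run : List Int),
      ((rest.map Prod.fst).Nodup) →
      (∀ pre k post, rest = pre ++ (k, -1) :: post → nxt.getD k (-1) = nextVal post) →
      (∀ rk ∈ run, rk ∉ rest.map Prod.fst) →
      (∀ rk ∈ run, f.get? rk = some last) →
      f.keys.Nodup →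
      lB = (if nextVal rest = -1 then lA else run.foldl (fun d rk => d.insert rk (nextVal rest)) lA) →
      fexA_loop rest f lA last run = fexB_loop nxt rest f lB last := by
  intro rest
  induction rest with
  | nil =>
    intro f lA lB last run _ _ _ _ _ hlB
    simp only [nextVal] at hlB
    simp [fexA_loop, fexB_loop, hlB]
  | cons kv rest ih =>
    intro f lA lB last run hnd hnxt hfresh hfget hfnd hlB
    obtain ⟨key, value⟩ := kv
    simp only [List.map_cons, List.nodup_cons] at hnd
    by_cases hv : value = -1
    · subst hv
      have hnv : nxt.getD key (-1) = nextVal rest := hnxt [] key rest rfl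
      have hnextcons : nextVal ((key, -1) :: rest) = nextVal rest := by simp [nextVal]
      by_cases hl : last = -1
      · -- both sides skip
        simp only [fexA_loop, fexB_loop,
          if_neg (by decide : ¬((-1:Int) ≠ -1)), if_neg (by simp [hl] : ¬(last ≠ -1))]
        exact ih f lA lB last run hnd.2
          (fun pre k post h => hnxt ((key, -1) :: pre) k post (by simp [h]))
          (fun rk hrk => fun hm => hfresh rk hrk (by simp [hm]))
          hfget hfnd (by rwa [hnextcons] at hlB)
      · -- -1 run continues
        have hkeyrun : ∀ rk ∈ run, rk ≠ key := fun rk hrk h =>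
          hfresh rk hrk (by simp [h])
        have hfold : (run ++ [key]).foldl (fun d rk => d.insert rk last) f = f.insert key last := by
          rw [List.foldl_append, foldl_insert_id run f last hfnd hfget]
          rfl
        simp only [fexA_loop, fexB_loop,
          if_neg (by decide : ¬((-1:Int) ≠ -1)), if_pos hl, hfold, hnv]
        have hfget' : ∀ rk ∈ run ++ [key], (f.insert key last).get? rk = some last := by
          intro rk hrk
          rcases List.mem_append.mp hrk with h | h
          · rw [PySem.Dict.get?_insert_of_ne _ _ (hkeyrun rk h)]
            exact hfget rk h
          · simp only [List.mem_singleton] at h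
            subst h
            exact PySem.Dict.get?_insert_self _ _ _
        have hfresh' : ∀ rk ∈ run ++ [key], rk ∉ rest.map Prod.fst := by
          intro rk hrk
          rcases List.mem_append.mp hrk with h | h
          · exact fun hm => hfresh rk h (by simp [hm])
          · simp only [List.mem_singleton] at h
            subst h
            exact hnd.1
        have hfnd' : (f.insert key last).keys.Nodup := PySem.Dict.nodup_keys_insert _ _ _ hfnd
        have hnxt' : ∀ pre k post, rest = pre ++ (k, -1) :: post → nxt.getD k (-1) = nextVal post :=
          fun pre k post h => hnxt ((key, -1) :: pre) k post (by simp [h])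
        by_cases hnvz : nextVal rest = -1
        · rw [if_neg (by simp [hnvz] : ¬(nextVal rest ≠ -1))]
          apply ih _ lA lB last (run ++ [key]) hnd.2 hnxt' hfresh' hfget' hfnd'
          rw [hnextcons, hnvz] at hlB
          simp [hnvz, hlB]
        · rw [if_pos hnvz]
          apply ih _ lA (lB.insert key (nextVal rest)) last (run ++ [key]) hnd.2 hnxt'
            hfresh' hfget' hfnd'
          rw [hnextcons, if_neg hnvz] at hlB
          simp [hnvz, List.foldl_append, hlB]
    · -- a real value closes the run
      have hnextcons : nextVal ((key, value) :: rest) = value := by simp [nextVal, hv]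
      simp only [fexA_loop, fexB_loop, if_pos hv]
      apply ih _ (run.foldl (fun d rk => d.insert rk value) lA) lB value []
        hnd.2
        (fun pre k post h => hnxt ((key, value) :: pre) k post (by simp [h]))
        (by simp) (by simp) hfnd
      rw [hnextcons, if_neg hv] at hlB
      simp [hlB]

-- ===== VERDICT (by name: the statement is the Claim_ definition above) =====
theorem found_extremes_map_spec : Claim_equal_found_extremes_map := by
  intro dmap _ hpre0
  have hpre : (dmap.map Prod.fst).Nodup := List.dedup_eq_self.mp hpre0
  unfold Spec_found_extremes_map found_extremes_map found_extremes_map_alt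
  have h := main_loop (fexB_nxt dmap) dmap PySem.Dict.empty PySem.Dict.empty
    PySem.Dict.empty (-1) [] hpre
    (by
      intro pre k post hsplit
      rw [bnx_eq, hsplit]
      exact bnx_lookup pre k post (hsplit ▸ hpre))
    (by simp) (by simp) (PySem.Dict.nodup_keys_empty)
    (by split <;> rfl)
  rw [h]
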